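-- pv_equiv track=rewrite | github.com/yohangumiel/relatorios-theclassic | app.py | fallback_keywords
-- ===== SOURCE A (Python) =====
-- def fallback_keywords(text: str) -> list[str]:
--     words = []
--     current = []
--     for char in text.lower():
--         if char.isalnum():
--             current.append(char)
--         elif current:
--             words.append("".join(current))
--             current = []
--     if current:
--         words.append("".join(current))
--
--     stopwords = {
--         "para", "com", "que", "uma", "por", "das", "dos", "de", "do", "da", "em",
--         "no", "na", "nos", "nas", "ser", "ter", "mais", "menos", "isso", "esse",
--         "essa", "aqui", "como", "quando", "onde", "porque", "pra", "pro", "the",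
--         "and", "you", "your", "for", "this", "that", "have", "has",
--     }
--     filtered = [word for word in words if len(word) >= 4 and word not in stopwords]
--     return filtered[:3]
-- ===== SOURCE B (Python) =====
-- def fallback_keywords(text: str) -> list[str]:
--     stopwords = {
--         "para", "com", "que", "uma", "por", "das", "dos", "de", "do", "da", "em",
--         "no", "na", "nos", "nas", "ser", "ter", "mais", "menos", "isso", "esse",
--         "essa", "aqui", "como", "quando", "onde", "porque", "pra", "pro", "the",
--         "and", "you", "your", "for", "this", "that", "have", "has",
--     }
--     cleaned = "".join(c if c.isalnum() else " " for c in text.lower())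
--     return [w for w in cleaned.split() if len(w) >= 4 and w not in stopwords][:3]
-- ===== Notes on version B (the rewrite author's own statement) =====
-- stated objective: idiomatic
-- what changed: Replaces A's hand-written character accumulator state machine with mapping each non-alphanumeric character of text.lower() to a space and tokenizing via str.split(), then the same length/stopword filter and [:3].
import Mathlib
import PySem

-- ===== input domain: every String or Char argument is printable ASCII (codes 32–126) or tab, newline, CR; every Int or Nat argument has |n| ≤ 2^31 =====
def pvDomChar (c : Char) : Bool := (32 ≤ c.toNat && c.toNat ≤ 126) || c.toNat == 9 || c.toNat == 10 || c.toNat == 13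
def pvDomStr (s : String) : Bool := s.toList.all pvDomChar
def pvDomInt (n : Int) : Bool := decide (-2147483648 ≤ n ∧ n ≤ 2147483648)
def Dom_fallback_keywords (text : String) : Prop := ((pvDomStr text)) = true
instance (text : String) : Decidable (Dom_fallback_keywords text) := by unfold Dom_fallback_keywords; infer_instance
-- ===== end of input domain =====

-- B replaces A's manual accumulator state machine by mapping non-alphanumerics to spaces and splitting (idiomatic; same cost).

-- shared stopword set literal from the Python source
def pvStop : List String :=
  ["para", "com", "que", "uma", "por", "das", "dos", "de", "do", "da", "em",
   "no", "na", "nos", "nas", "ser", "ter", "mais", "menos", "isso", "esse",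
   "essa", "aqui", "como", "quando", "onde", "porque", "pra", "pro", "the",
   "and", "you", "your", "for", "this", "that", "have", "has"]

-- ===== PORT A =====
-- A's loop body: append alnum chars to current, flush current into words at a separator
def pvStepA (st : List (List Char) × List Char) (c : Char) : List (List Char) × List Char :=
  if PySem.Chars.isalnum c then (st.1, st.2 ++ [c])
  else if st.2.isEmpty then st else (st.1 ++ [st.2], [])

def fallback_keywords (text : String) : List String :=
  let st := (PySem.Chars.lower text.toList).foldl pvStepA ([], [])
  let words := if st.2.isEmpty then st.1 else st.1 ++ [st.2]
  let filtered := words.filter (fun w => decide (4 ≤ w.length) && !(pvStop.contains (String.mk w)))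
  (filtered.map String.mk).take 3

-- ===== PORT B =====
def fallback_keywords_alt (text : String) : List String :=
  let cleaned := (PySem.Chars.lower text.toList).map
    (fun c => if PySem.Chars.isalnum c then c else ' ')
  let words := PySem.Chars.split₀ cleaned
  ((words.filter (fun w => decide (4 ≤ w.length) && !(pvStop.contains (String.mk w)))).map String.mk).take 3

-- ===== PRECONDITION & SPEC =====
def Spec_fallback_keywords (text : String) (out : List String) : Prop := out = fallback_keywords_alt text
instance (text : String) (out : List String) : Decidable (Spec_fallback_keywords text out) := by unfold Spec_fallback_keywords; infer_instance

-- ===== CLAIM (what is proved, stated in full; the proofs are below) =====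
def Claim_equal_fallback_keywords : Prop := ∀ (text : String), Dom_fallback_keywords text → Spec_fallback_keywords text (fallback_keywords text)

-- ===== LEMMAS AND PROOFS =====
theorem pv_alnum_not_space (c : Char) (h : PySem.Chars.isalnum c = true) :
    PySem.Chars.isspace c = false := by
  simp [PySem.Chars.isalnum, PySem.Chars.isalpha, PySem.Chars.isdigit,
        PySem.Chars.isupper, PySem.Chars.islower, Char.le_def, UInt32.le_iff_toNat_le] at h
  have e : c.toNat = c.val.toNat := rfl
  simp only [PySem.Chars.isspace, e]
  simp
  omega

theorem pv_go_nil (cur : List Char) (acc : List (List Char)) :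
    PySem.Chars.split₀.go [] cur acc =
      if cur.isEmpty then acc.reverse else (cur.reverse :: acc).reverse := by
  rw [PySem.Chars.split₀.go.eq_def]

theorem pv_go_cons (c : Char) (rest cur : List Char) (acc : List (List Char)) :
    PySem.Chars.split₀.go (c :: rest) cur acc =
      if PySem.Chars.isspace c then
        (if cur.isEmpty then PySem.Chars.split₀.go rest [] acc
         else PySem.Chars.split₀.go rest [] (cur.reverse :: acc))
      else PySem.Chars.split₀.go rest (c :: cur) acc := by
  rw [PySem.Chars.split₀.go.eq_def]

-- A's fold (with the final flush) computes exactly split₀ of the space-mapped list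
theorem pv_tokens_eq (cs : List Char) : ∀ (current : List Char) (words : List (List Char)),
    PySem.Chars.split₀.go (cs.map (fun c => if PySem.Chars.isalnum c then c else ' '))
      current.reverse words.reverse =
    (let st := cs.foldl pvStepA (words, current);
     if st.2.isEmpty then st.1 else st.1 ++ [st.2]) := by
  induction cs with
  | nil =>
      intro current words
      rw [List.map_nil, pv_go_nil]
      cases current <;> simp
  | cons c cs ih =>
      intro current words
      by_cases h : PySem.Chars.isalnum c = true
      · have hs := pv_alnum_not_space c h
        simp only [List.map_cons, h, ite_true, List.foldl_cons]
        rw [pv_go_cons]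
        simp only [hs, Bool.false_eq_true, ite_false]
        have e : (c :: current.reverse) = (current ++ [c]).reverse := by simp
        rw [e, ih (current ++ [c]) words]
        simp [pvStepA, h]
      · simp only [List.map_cons, List.foldl_cons, if_neg h]
        rw [pv_go_cons]
        simp only [show PySem.Chars.isspace ' ' = true from by decide, ite_true]
        cases current with
        | nil =>
            rw [List.reverse_nil]
            simp only [List.isEmpty_nil, ite_true]
            have := ih [] words
            rw [List.reverse_nil] at this
            rw [this]
            simp [pvStepA, h]
        | cons d ds =>
            have hne : ((d :: ds).reverse).isEmpty = false := by simp
            simp only [hne, Bool.false_eq_true, ite_false]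
            have e : ((d :: ds).reverse.reverse :: words.reverse) = (words ++ [d :: ds]).reverse := by
              simp
            rw [e]
            have := ih [] (words ++ [d :: ds])
            rw [List.reverse_nil] at this
            rw [this]
            simp [pvStepA, h]

-- ===== VERDICT (by name: the statement is the Claim_ definition above) =====
theorem fallback_keywords_spec : Claim_equal_fallback_keywords := by
  intro text _
  unfold Spec_fallback_keywords fallback_keywords fallback_keywords_alt
  simp only [PySem.Chars.split₀]
  have := pv_tokens_eq (PySem.Chars.lower text.toList) [] []
  simp only [List.reverse_nil] at this
  rw [this]
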